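-- pv_equiv track=rewrite | github.com/cgcgcg/vvtest | libvvtest/parsevvt.py | parse_param_values
-- ===== SOURCE A (Python) =====
-- def parse_param_values( param_name, value_string, force_params ):
--     """
--     The 'force_params' argument is a dictionary mapping parameter names
--     to a list of values (multiple values can be forced onto a parameter).
--
--         - np=1 2    force=5      ->  np=5 5  (dups get removed if not staged)
--         - np=1 2    force=5 6    ->  np=5 6
--         - np=1 2 3  force=5 6    ->  np=5 6 5 (dups get removed if not staged)
--         - np=1 2    force=5 6 7  ->  np=5 6 7
--
--     Keep same number of values as 'value_string' if less than or equal to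
--     the list in 'force_params'. May need to repeat the forced values.
--
--     Increase the number of values to equal the list in 'force_params' if the
--     'value_string' values has smaller length.
--     """
--     vals = value_string.strip().split()
--
--     if force_params is not None and param_name in force_params:
--
--         force_vals = force_params[ param_name ]
--         new_len = max( len(vals), len(force_vals) )
--
--         vals = []
--         j = 0
--         for i in range(new_len):
--             vals.append( force_vals[j] )
--             j = (j+1)%len(force_vals)
--
--     return [ [v] for v in vals ]
-- ===== SOURCE B (Python) =====
-- def cycle_take(force_vals, n):
--     """Recursively build n cycled values, each wrapped as a singleton list."""
--     if n <= len(force_vals):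
--         return [[v] for v in force_vals[:n]]
--     return [[v] for v in force_vals] + cycle_take(force_vals, n - len(force_vals))
--
-- def parse_param_values(param_name, value_string, force_params):
--     fv = None if force_params is None else force_params.get(param_name)
--     words = value_string.strip().split()
--     if fv is None:
--         return [[w] for w in words]
--     return cycle_take(fv, max(len(words), len(fv)))
-- ===== Notes on version B (the rewrite author's own statement) =====
-- stated objective: alternative
-- what changed: The index/modulo bookkeeping loop is replaced by a recursive block-wise decomposition: a helper emits whole copies of force_vals (as singleton lists directly) and recurses on the remaining count, truncating the last copy; the dict guard collapses to a single .get lookup.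
import Mathlib
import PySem

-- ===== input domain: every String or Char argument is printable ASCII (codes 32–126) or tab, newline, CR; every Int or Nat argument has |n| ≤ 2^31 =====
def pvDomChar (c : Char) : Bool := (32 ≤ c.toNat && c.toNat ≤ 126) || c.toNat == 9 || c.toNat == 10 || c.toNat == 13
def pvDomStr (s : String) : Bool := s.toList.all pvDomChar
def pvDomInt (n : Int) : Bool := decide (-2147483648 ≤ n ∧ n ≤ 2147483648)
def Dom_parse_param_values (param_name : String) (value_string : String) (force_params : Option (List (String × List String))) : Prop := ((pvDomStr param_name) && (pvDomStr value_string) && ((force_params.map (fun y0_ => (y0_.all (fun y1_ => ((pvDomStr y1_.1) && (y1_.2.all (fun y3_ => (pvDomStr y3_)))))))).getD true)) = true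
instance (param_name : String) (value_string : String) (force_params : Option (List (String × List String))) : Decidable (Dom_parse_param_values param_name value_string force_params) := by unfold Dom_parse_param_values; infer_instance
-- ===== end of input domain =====

-- B replaces the index/modulo cycling loop by a recursive block-wise helper emitting whole
-- copies of the forced values (alternative decomposition; same cost).

-- ===== PORT A =====
def parse_param_values (param_name : String) (value_string : String) (force_params : Option (List (String × List String))) : List (List String) :=
  let vals := PySem.Str.split₀ (PySem.Str.strip value_string)
  let vals :=
    match force_params with
    | none => vals
    | some fp =>
      match (PySem.Dict.mk fp).get? param_name with
      | none => vals
      | some force_vals =>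
        -- for i in range(new_len): vals.append(force_vals[j]); j = (j+1) % len(force_vals)
        -- force_vals[j] raises IndexError when force_vals = [] and the loop runs: excluded by Pre_ (getD is the total form)
        let new_len := max vals.length force_vals.length
        ((List.range new_len).foldl
          (fun (st : List String × Nat) _ =>
            (st.1 ++ [force_vals.getD st.2 ""], (st.2 + 1) % force_vals.length))
          ([], 0)).1
  vals.map (fun v => [v])

-- ===== PORT B =====
-- cycle_take: emits one full copy of force_vals per step, recursing on the remaining count;
-- the 'fv.length = 0' test is a totality guard only (Python recurses forever there).
def cycle_take (force_vals : List String) (n : Nat) : List (List String) :=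
  if n ≤ force_vals.length then (force_vals.take n).map (fun v => [v])
  else if force_vals.length = 0 then []
  else (force_vals.map (fun v => [v])) ++ cycle_take force_vals (n - force_vals.length)
termination_by n
decreasing_by omega

def parse_param_values_alt (param_name : String) (value_string : String) (force_params : Option (List (String × List String))) : List (List String) :=
  let fv := force_params.bind (fun fp => (PySem.Dict.mk fp).get? param_name)
  let words := PySem.Str.split₀ (PySem.Str.strip value_string)
  match fv with
  | none => words.map (fun w => [w])
  | some force_vals => cycle_take force_vals (max words.length force_vals.length)

-- ===== PRECONDITION & SPEC =====
-- Pre_ excludes exactly the inputs where A raises IndexError (and B RecursionError):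
-- force_params maps param_name to the empty list while value_string splits into ≥ 1 word.
def Pre_parse_param_values (param_name : String) (value_string : String) (force_params : Option (List (String × List String))) : Prop :=
  force_params.bind (fun fp => (PySem.Dict.mk fp).get? param_name) = some [] →
    PySem.Str.split₀ (PySem.Str.strip value_string) = []
instance (param_name : String) (value_string : String) (force_params : Option (List (String × List String))) : Decidable (Pre_parse_param_values param_name value_string force_params) := by unfold Pre_parse_param_values; infer_instance

def pvWitness_parse_param_values : String × String × (Option (List (String × List String))) := ("np", "1 2 3", some [("np", ["5", "6"])])

def Spec_parse_param_values (param_name : String) (value_string : String) (force_params : Option (List (String × List String))) (out : List (List String)) : Prop := out = parse_param_values_alt param_name value_string force_params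
instance (param_name : String) (value_string : String) (force_params : Option (List (String × List String))) (out : List (List String)) : Decidable (Spec_parse_param_values param_name value_string force_params out) := by unfold Spec_parse_param_values; infer_instance

-- ===== CLAIM =====
def Claim_equal_parse_param_values : Prop := ∀ (param_name : String) (value_string : String) (force_params : Option (List (String × List String))), Dom_parse_param_values param_name value_string force_params → Pre_parse_param_values param_name value_string force_params → Spec_parse_param_values param_name value_string force_params (parse_param_values param_name value_string force_params)

-- ===== LEMMAS AND PROOFS =====

-- A's (j+1)%L bookkeeping selects fv[i % L] at step i
lemma loop_cycles {fv : List String} (n : Nat) :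
    (List.range n).foldl
      (fun (st : List String × Nat) _ =>
        (st.1 ++ [fv.getD st.2 ""], (st.2 + 1) % fv.length))
      ([], 0)
    = ((List.range n).map (fun i => fv.getD (i % fv.length) ""), n % fv.length) := by
  induction n with
  | zero => simp
  | succ n ih =>
    rw [List.range_succ, List.foldl_append, List.map_append, ih]
    simp only [List.foldl_cons, List.foldl_nil, List.map_cons, List.map_nil]
    exact congrArg₂ Prod.mk rfl (Nat.mod_add_mod n fv.length 1)

lemma take_map_getD {fv : List String} (n : Nat) (h : n ≤ fv.length) :
    (fv.take n).map (fun v => [v])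
    = (List.range n).map (fun i => [fv.getD (i % fv.length) ""]) := by
  apply List.ext_getElem
  · simp [h]
  · intro i h1 h2
    simp only [List.length_map, List.length_take] at h1
    have hi : i < n := by omega
    have hif : i < fv.length := by omega
    simp [List.getElem_take, Nat.mod_eq_of_lt hif,
      List.getElem?_eq_getElem hif]

lemma cycle_take_eq {fv : List String} (hfv : fv ≠ []) (n : Nat) :
    cycle_take fv n = (List.range n).map (fun i => [fv.getD (i % fv.length) ""]) := by
  induction n using Nat.strong_induction_on with
  | _ n ih =>
    rw [cycle_take]
    by_cases hle : n ≤ fv.length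
    · rw [if_pos hle, take_map_getD n hle]
    · have hL : fv.length ≠ 0 := fun h0 => hfv (List.eq_nil_of_length_eq_zero h0)
      rw [if_neg hle, if_neg hL, ih (n - fv.length) (by omega)]
      have hsplit : n = fv.length + (n - fv.length) := by omega
      conv_rhs => rw [hsplit, List.range_add, List.map_append, List.map_map]
      congr 1
      · rw [← take_map_getD fv.length (le_refl _), List.take_length]
      · apply List.map_congr_left
        intro i _
        simp [Nat.add_mod_left]

-- ===== VERDICT =====
theorem parse_param_values_spec : Claim_equal_parse_param_values := by
  intro param_name value_string force_params _ hpre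
  unfold Spec_parse_param_values parse_param_values parse_param_values_alt
  cases force_params with
  | none => rfl
  | some fp =>
    cases hget : (PySem.Dict.mk fp).get? param_name with
    | none => simp [hget]
    | some fv =>
      unfold Pre_parse_param_values at hpre
      simp only [Option.bind_some, hget] at hpre
      simp only [Option.bind_some, hget]
      by_cases hfv : fv = []
      · subst hfv
        have hv : PySem.Str.split₀ (PySem.Str.strip value_string) = [] := hpre rfl
        simp [hv, cycle_take]
      · rw [loop_cycles, cycle_take_eq hfv]
        simp [List.map_map]
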